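-- pv_equiv track=rewrite | github.com/key-moon/golf | data/compeval/4/050_base_notebooks_5.py | p
-- ===== SOURCE A (Python) =====
-- def	p(g):
-- 	B=range;G=[A[:]for	A	in	g];H,I=len(g),len(g[0]);K=[(A,C)for	A	in	B(H)for	C	in	B(I)if	g[A][C]==8]
-- 	for(C,D)in	K:
-- 		for(E,F)in[(0,1),(1,0),(0,-1),(-1,0)]:
-- 			A=1
-- 			while	0<=C+A*E<H	and	0<=D+A*F<I:
-- 				if	g[C+A*E][D+A*F]==8:
-- 					for	J	in	B(1,A):G[C+J*E][D+J*F]=3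
-- 					break
-- 				A+=1
-- 	return	G
-- ===== SOURCE B (Python) =====
-- def p(g):
--     # One scan per row and per column: fill cells strictly between
--     # consecutive 8s with 3, tracking the index of the last 8 seen.
--     # Like A, only the leading len(g[0]) columns of each row are considered.
--     W = len(g[0])
--     out = [row[:] for row in g]
--     for row in out:
--         last = -1
--         for j in range(W):
--             if row[j] == 8:
--                 if last >= 0:
--                     for k in range(last + 1, j):
--                         row[k] = 3
--                 last = j
--     H = len(out)
--     for j in range(W):
--         last = -1
--         for i in range(H):
--             if out[i][j] == 8:
--                 if last >= 0:
--                     for k in range(last + 1, i):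
--                         out[k][j] = 3
--                 last = i
--     return out
-- ===== Notes on version B (the rewrite author's own statement) =====
-- stated objective: alternative
-- what changed: Instead of walking in all four directions from every 8-cell until the next 8, B makes one left-to-right scan per row and one top-to-bottom scan per column, filling between consecutive 8s using the last-seen 8 index.
import Mathlib
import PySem

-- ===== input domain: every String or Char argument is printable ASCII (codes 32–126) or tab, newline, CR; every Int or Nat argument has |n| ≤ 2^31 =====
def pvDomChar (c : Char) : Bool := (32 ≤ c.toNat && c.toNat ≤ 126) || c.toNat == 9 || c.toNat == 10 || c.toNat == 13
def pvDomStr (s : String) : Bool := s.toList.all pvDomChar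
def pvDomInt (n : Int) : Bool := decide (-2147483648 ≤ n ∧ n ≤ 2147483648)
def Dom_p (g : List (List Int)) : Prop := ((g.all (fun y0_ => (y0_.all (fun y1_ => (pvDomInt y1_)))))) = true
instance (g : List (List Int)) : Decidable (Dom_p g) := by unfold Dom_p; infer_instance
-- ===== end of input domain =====

-- B replaces A's four-directional walk from every 8-cell by one linear scan per row
-- and per column that fills between consecutive 8s using the last-seen 8 index.
-- A mutates no argument; equivalence is about the return value.

-- ===== PORT A =====
-- g[i][j] (both ports; indices are nonnegative and in range under Pre_)
def pvCell (g : List (List Int)) (i j : Int) : Int :=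
  PySem.List.pyGetD (PySem.List.pyGetD g i []) j 0

-- G[i][j] = v (both ports; indices nonnegative and in range under Pre_)
def pvSet (G : List (List Int)) (i j v : Int) : List (List Int) :=
  PySem.List.pySetD G i (PySem.List.pySetD (PySem.List.pyGetD G i []) j v)

-- the 'while 0<=C+A*E<H and 0<=D+A*F<I' loop of A; fuel > H+I bounds the trip count
def pvWalkA (g : List (List Int)) (C D E F H I : Int) :
    List (List Int) → Int → Nat → List (List Int)
  | G, _, 0 => G
  | G, a, fuel + 1 =>
    if 0 ≤ C + a * E ∧ C + a * E < H ∧ 0 ≤ D + a * F ∧ D + a * F < I then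
      if pvCell g (C + a * E) (D + a * F) = 8 then
        (PySem.List.pyRange 1 a 1).foldl (fun G2 J => pvSet G2 (C + J * E) (D + J * F) 3) G
      else pvWalkA g C D E F H I G (a + 1) fuel
    else G

def p (g : List (List Int)) : List (List Int) :=
  let G := g.map (fun A => A)
  let H : Int := (g.length : Int)
  let I : Int := ((PySem.List.pyGetD g 0 []).length : Int)
  let K := (PySem.List.pyRange 0 H 1).flatMap (fun A =>
    ((PySem.List.pyRange 0 I 1).filter (fun C => pvCell g A C == 8)).map (fun C => (A, C)))
  K.foldl (fun G2 CD =>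
    ([((0 : Int), (1 : Int)), (1, 0), (0, -1), (-1, 0)]).foldl (fun G3 EF =>
      pvWalkA g CD.1 CD.2 EF.1 EF.2 H I G3 1 (H.toNat + I.toNat + 1)) G2) G

-- ===== PORT B =====
-- 'for k in range(a, b): row[k] = 3'
def pvFillRow (r : List Int) (a b : Int) : List Int :=
  (PySem.List.pyRange a b 1).foldl (fun r2 k => PySem.List.pySetD r2 k 3) r

-- one left-to-right scan of a row, filling between consecutive 8s (state = (last, row))
def pvRowScan (W : Int) (row : List Int) : List Int :=
  ((PySem.List.pyRange 0 W 1).foldl (fun (s : Int × List Int) j =>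
      if PySem.List.pyGetD s.2 j 0 = 8 then
        (j, if 0 ≤ s.1 then pvFillRow s.2 (s.1 + 1) j else s.2)
      else s)
    (-1, row)).2

-- one top-to-bottom scan of column j, filling between consecutive 8s (state = (last, grid))
def pvColScan (H j : Int) (out : List (List Int)) : List (List Int) :=
  ((PySem.List.pyRange 0 H 1).foldl (fun (s : Int × List (List Int)) i =>
      if pvCell s.2 i j = 8 then
        (i, if 0 ≤ s.1 then
              (PySem.List.pyRange (s.1 + 1) i 1).foldl (fun G k => pvSet G k j 3) s.2
            else s.2)
      else s)
    (-1, out)).2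

def p_alt (g : List (List Int)) : List (List Int) :=
  let W : Int := ((PySem.List.pyGetD g 0 []).length : Int)
  let out := (g.map (fun row => row)).map (pvRowScan W)
  let H : Int := (out.length : Int)
  (PySem.List.pyRange 0 W 1).foldl (fun out2 j => pvColScan H j out2) out

-- ===== PRECONDITION & SPEC =====
-- Pre_ excludes exactly the inputs on which A raises IndexError: the empty grid
-- (len(g[0])) and grids in which some row is shorter than the first row.
def Pre_p (g : List (List Int)) : Prop :=
  g ≠ [] ∧ ∀ r ∈ g, g.headI.length ≤ r.length
instance (g : List (List Int)) : Decidable (Pre_p g) := by unfold Pre_p; infer_instance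

def pvWitness_p : List (List Int) := [[8, 0, 8], [0, 0, 0]]

def Spec_p (g : List (List Int)) (out : List (List Int)) : Prop := out = p_alt g
instance (g : List (List Int)) (out : List (List Int)) : Decidable (Spec_p g out) := by
  unfold Spec_p; infer_instance

-- ===== CLAIM (what is proved, stated in full; the proofs are below) =====
def Claim_equal_p : Prop := ∀ (g : List (List Int)), Dom_p g → Pre_p g → Spec_p g (p g)

-- ===== LEMMAS AND PROOFS =====

-- g[i][j] over Nat indices, total with defaults
def getc (G : List (List Int)) (i j : Nat) : Int := (G.getD i []).getD j 0

-- same shape (row count and every row length) as g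
def Sh (g G' : List (List Int)) : Prop :=
  G'.length = g.length ∧ ∀ a : Nat, (G'.getD a []).length = (g.getD a []).length

-- G' is g with exactly the cells in S overwritten by 3
def Ag (g G' : List (List Int)) (S : Nat → Nat → Prop) : Prop :=
  Sh g G' ∧ ∀ a b : Nat,
    (S a b → getc G' a b = 3) ∧ (¬ S a b → getc G' a b = getc g a b)

-- cell (i,j) of g holds an 8 (inside the H×W frame A and B look at)
def Eight (g : List (List Int)) (i j : Nat) : Prop :=
  i < g.length ∧ j < g.headI.length ∧ getc g i j = 8

def RowF (g : List (List Int)) (i j : Nat) : Prop :=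
  getc g i j ≠ 8 ∧ (∃ j1, j1 < j ∧ Eight g i j1) ∧ (∃ j2, j < j2 ∧ Eight g i j2)

def ColF (g : List (List Int)) (i j : Nat) : Prop :=
  getc g i j ≠ 8 ∧ (∃ i1, i1 < i ∧ Eight g i1 j) ∧ (∃ i2, i < i2 ∧ Eight g i2 j)

def Fill (g : List (List Int)) (i j : Nat) : Prop := RowF g i j ∨ ColF g i j


lemma getD_zero_headI (g : List (List Int)) : g.getD 0 [] = g.headI := by
  cases g <;> rfl

lemma pvCell_natCast (g : List (List Int)) (i j : Nat) : pvCell g ↑i ↑j = getc g i j := by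
  simp [pvCell, getc, PySem.List.pyGetD_natCast]

lemma pvCell_nonneg (g : List (List Int)) (i j : Int) (hi : 0 ≤ i) (hj : 0 ≤ j) :
    pvCell g i j = getc g i.toNat j.toNat := by
  rw [← pvCell_natCast, Int.toNat_of_nonneg hi, Int.toNat_of_nonneg hj]

lemma rowlen_ge (g : List (List Int)) (hpre : Pre_p g) (i : Nat) (hi : i < g.length) :
    g.headI.length ≤ (g.getD i []).length := by
  apply hpre.2
  rw [List.getD_eq_getElem g [] hi]
  exact List.getElem_mem hi

lemma getc_set (G : List (List Int)) (i j : Nat) (v : Int)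
    (hi : i < G.length) (hj : j < (G.getD i []).length) (x y : Nat) :
    getc (G.set i ((G.getD i []).set j v)) x y =
      if x = i ∧ y = j then v else getc G x y := by
  unfold getc
  by_cases hx : x = i
  · subst hx
    rw [List.getD_eq_getElem _ [] (by simpa using hi), List.getElem_set_self]
    by_cases hy : y = j
    · subst hy
      rw [List.getD_eq_getElem _ 0 (by simpa using hj), List.getElem_set_self]
      simp
    · simp only [hy, and_false, if_false, List.getD_eq_getElem?_getD]
      rw [List.getElem?_set_ne (by omega)]
  · simp only [hx, false_and, if_false, List.getD_eq_getElem?_getD]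
    rw [List.getElem?_set_ne (by omega)]

lemma Sh_set (g G : List (List Int)) (hS : Sh g G) (i j : Nat) (v : Int) :
    Sh g (G.set i ((G.getD i []).set j v)) := by
  obtain ⟨h1, h2⟩ := hS
  refine ⟨by simpa using h1, fun a => ?_⟩
  by_cases hi : i < G.length
  · by_cases hx : a = i
    · subst hx
      rw [List.getD_eq_getElem _ [] (by simpa using hi), List.getElem_set_self]
      simpa using h2 a
    · rw [List.getD_eq_getElem?_getD, List.getElem?_set_ne (by omega),
        ← List.getD_eq_getElem?_getD]
      exact h2 a
  · rw [List.set_eq_of_length_le (by omega)]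
    exact h2 a

lemma Ag_iff (g G : List (List Int)) (S S' : Nat → Nat → Prop) (h : Ag g G S)
    (hss : ∀ a b, S a b ↔ S' a b) : Ag g G S' := by
  refine ⟨h.1, fun a b => ⟨fun hs => (h.2 a b).1 ((hss a b).2 hs),
    fun hs => (h.2 a b).2 (fun c => hs ((hss a b).1 c))⟩⟩

lemma Ag_refl (g : List (List Int)) : Ag g g (fun _ _ => False) :=
  ⟨⟨rfl, fun _ => rfl⟩, fun _ _ => ⟨fun h => h.elim, fun _ => rfl⟩⟩

lemma Ag_pvSet (g G : List (List Int)) (S : Nat → Nat → Prop) (hpre : Pre_p g)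
    (h : Ag g G S) (i j : Int) (hi0 : 0 ≤ i) (hj0 : 0 ≤ j)
    (hi : i < (g.length : Int)) (hj : j < (g.headI.length : Int)) :
    Ag g (pvSet G i j 3) (fun a b => S a b ∨ ((a : Int) = i ∧ (b : Int) = j)) := by
  obtain ⟨iN, rfl⟩ : ∃ n : Nat, i = (n : Int) := ⟨i.toNat, (Int.toNat_of_nonneg hi0).symm⟩
  obtain ⟨jN, rfl⟩ : ∃ n : Nat, j = (n : Int) := ⟨j.toNat, (Int.toNat_of_nonneg hj0).symm⟩
  have hiN : iN < g.length := by exact_mod_cast hi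
  have hjN : jN < g.headI.length := by exact_mod_cast hj
  have hiG : iN < G.length := by rw [h.1.1]; exact hiN
  have hjG : jN < (G.getD iN []).length := by
    calc jN < g.headI.length := hjN
    _ ≤ (g.getD iN []).length := rowlen_ge g hpre iN hiN
    _ = (G.getD iN []).length := (h.1.2 iN).symm
  rw [pvSet, PySem.List.pySetD_natCast, PySem.List.pyGetD_natCast, PySem.List.pySetD_natCast]
  refine ⟨Sh_set g G h.1 iN jN 3, fun a b => ?_⟩
  rw [getc_set G iN jN 3 hiG hjG a b]
  constructor
  · rintro (hs | ⟨ha, hb⟩)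
    · split_ifs with hif
      · rfl
      · exact (h.2 a b).1 hs
    · have : a = iN ∧ b = jN := by constructor <;> omega
      simp [this]
  · intro hs
    rw [if_neg (by rintro ⟨rfl, rfl⟩; exact hs (Or.inr ⟨rfl, rfl⟩)),
      (h.2 a b).2 (fun c => hs (Or.inl c))]

lemma Ag_fill_map (g : List (List Int)) (hpre : Pre_p g) (f : Int → Int × Int)
    (L : List Int)
    (hL : ∀ k ∈ L, 0 ≤ (f k).1 ∧ (f k).1 < (g.length : Int) ∧
          0 ≤ (f k).2 ∧ (f k).2 < (g.headI.length : Int)) :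
    ∀ (G : List (List Int)) (S : Nat → Nat → Prop), Ag g G S →
    Ag g (L.foldl (fun G2 k => pvSet G2 (f k).1 (f k).2 3) G)
      (fun x y => S x y ∨ ∃ k ∈ L, (x : Int) = (f k).1 ∧ (y : Int) = (f k).2) := by
  induction L with
  | nil => intro G S h; simpa using Ag_iff g G S _ h (by simp)
  | cons hd tl ih =>
    intro G S h
    have hhd := hL hd (by simp)
    have step := Ag_pvSet g G S hpre h (f hd).1 (f hd).2 hhd.1 hhd.2.2.1 hhd.2.1 hhd.2.2.2
    have := ih (fun k hk => hL k (by simp [hk])) _ _ step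
    simp only [List.foldl_cons]
    refine Ag_iff g _ _ _ this (fun x y => ?_)
    constructor
    · rintro ((hs | hp) | ⟨k, hk, hx, hy⟩)
      · exact Or.inl hs
      · exact Or.inr ⟨hd, by simp, hp.1, hp.2⟩
      · exact Or.inr ⟨k, by simp [hk], hx, hy⟩
    · rintro (hs | ⟨k, hk, hx, hy⟩)
      · exact Or.inl (Or.inl hs)
      · rcases List.mem_cons.1 hk with rfl | hk
        · exact Or.inl (Or.inr ⟨hx, hy⟩)
        · exact Or.inr ⟨k, hk, hx, hy⟩

lemma Ag_foldl_union {α : Type} (g : List (List Int)) (L : List α)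
    (w : α → Nat → Nat → Prop) (step : List (List Int) → α → List (List Int))
    (hw : ∀ x ∈ L, ∀ a b, w x a b → getc g a b ≠ 8)
    (hstep : ∀ (G : List (List Int)) (S : Nat → Nat → Prop) (x : α), x ∈ L →
      (∀ a b, S a b → getc g a b ≠ 8) → Ag g G S →
      Ag g (step G x) (fun a b => S a b ∨ w x a b)) :
    ∀ (G : List (List Int)) (S : Nat → Nat → Prop),
      (∀ a b, S a b → getc g a b ≠ 8) → Ag g G S →
      Ag g (L.foldl step G) (fun a b => S a b ∨ ∃ x ∈ L, w x a b) := by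
  induction L with
  | nil => intro G S hS h; simpa using Ag_iff g G S _ h (by simp)
  | cons hd tl ih =>
    intro G S hS h
    have h1 := hstep G S hd (by simp) hS h
    have hS1 : ∀ a b, (S a b ∨ w hd a b) → getc g a b ≠ 8 := by
      rintro a b (hs | hs)
      · exact hS a b hs
      · exact hw hd (by simp) a b hs
    have := ih (fun x hx => hw x (by simp [hx]))
      (fun G S x hx => hstep G S x (by simp [hx])) _ _ hS1 h1
    simp only [List.foldl_cons]
    refine Ag_iff g _ _ _ this (fun x y => ?_)
    constructor
    · rintro ((hs | hp) | ⟨k, hk, hh⟩)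
      · exact Or.inl hs
      · exact Or.inr ⟨hd, by simp, hp⟩
      · exact Or.inr ⟨k, by simp [hk], hh⟩
    · rintro (hs | ⟨k, hk, hh⟩)
      · exact Or.inl (Or.inl hs)
      · rcases List.mem_cons.1 hk with rfl | hk
        · exact Or.inl (Or.inr hh)
        · exact Or.inr ⟨k, hk, hh⟩


-- ===== 1-D (row) machinery for B =====

def AgR (xs r : List Int) (S : Nat → Prop) : Prop :=
  r.length = xs.length ∧ ∀ b : Nat, (S b → r.getD b 0 = 3) ∧ (¬ S b → r.getD b 0 = xs.getD b 0)

lemma AgR_iff (xs r : List Int) (S S' : Nat → Prop) (h : AgR xs r S)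
    (hss : ∀ b, S b ↔ S' b) : AgR xs r S' :=
  ⟨h.1, fun b => ⟨fun hs => (h.2 b).1 ((hss b).2 hs), fun hs => (h.2 b).2 (fun c => hs ((hss b).1 c))⟩⟩

lemma getD_set_row (r : List Int) (k : Nat) (hk : k < r.length) (v : Int) (y : Nat) :
    (r.set k v).getD y 0 = if y = k then v else r.getD y 0 := by
  by_cases hy : y = k
  · subst hy
    rw [List.getD_eq_getElem _ 0 (by simpa using hk), List.getElem_set_self]
    simp
  · simp only [hy, if_false, List.getD_eq_getElem?_getD]
    rw [List.getElem?_set_ne (by omega)]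

lemma AgR_set (xs r : List Int) (S : Nat → Prop) (h : AgR xs r S) (k : Int)
    (hk0 : 0 ≤ k) (hk : k < (xs.length : Int)) :
    AgR xs (PySem.List.pySetD r k 3) (fun b => S b ∨ (b : Int) = k) := by
  obtain ⟨kN, rfl⟩ : ∃ n : Nat, k = (n : Int) := ⟨k.toNat, (Int.toNat_of_nonneg hk0).symm⟩
  have hkN : kN < r.length := by rw [h.1]; exact_mod_cast hk
  rw [PySem.List.pySetD_natCast]
  refine ⟨by simpa using h.1, fun b => ?_⟩
  rw [getD_set_row r kN hkN 3 b]
  constructor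
  · rintro (hs | hb)
    · split_ifs with hif
      · rfl
      · exact (h.2 b).1 hs
    · have : b = kN := by exact_mod_cast hb
      simp [this]
  · intro hs
    rw [if_neg (by rintro rfl; exact hs (Or.inr rfl)), (h.2 b).2 (fun c => hs (Or.inl c))]

lemma AgR_fill (xs : List Int) (L : List Int)
    (hL : ∀ k ∈ L, 0 ≤ k ∧ k < (xs.length : Int)) :
    ∀ (r : List Int) (S : Nat → Prop), AgR xs r S →
    AgR xs (L.foldl (fun r2 k => PySem.List.pySetD r2 k 3) r)
      (fun b => S b ∨ (b : Int) ∈ L) := by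
  induction L with
  | nil => intro r S h; simpa using AgR_iff xs r S _ h (by simp)
  | cons hd tl ih =>
    intro r S h
    have hhd := hL hd (by simp)
    have step := AgR_set xs r S h hd hhd.1 hhd.2
    have := ih (fun k hk => hL k (by simp [hk])) _ _ step
    simp only [List.foldl_cons]
    refine AgR_iff xs _ _ _ this (fun b => ?_)
    constructor
    · rintro ((hs | hb) | hb)
      · exact Or.inl hs
      · exact Or.inr (by simp [hb])
      · exact Or.inr (by simp [hb])
    · rintro (hs | hb)
      · exact Or.inl (Or.inl hs)
      · rcases List.mem_cons.1 hb with hb | hb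
        · exact Or.inl (Or.inr hb)
        · exact Or.inr hb

def RowFill1 (xs : List Int) (W : Nat) (b : Nat) : Prop :=
  xs.getD b 0 ≠ 8 ∧ (∃ j1, j1 < b ∧ xs.getD j1 0 = 8) ∧
  (∃ j2, b < j2 ∧ j2 < W ∧ xs.getD j2 0 = 8)

def LastR (xs : List Int) (n : Nat) (l : Int) : Prop :=
  (l = -1 ∧ ∀ j, j < n → xs.getD j 0 ≠ 8) ∨
  (∃ jl : Nat, l = (jl : Int) ∧ jl < n ∧ xs.getD jl 0 = 8 ∧
    ∀ j, jl < j → j < n → xs.getD j 0 ≠ 8)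

lemma rowScan_aux (xs : List Int) : ∀ n : Nat, n ≤ xs.length →
    AgR xs (((PySem.List.pyRange 0 (n : Int) 1).foldl (fun (s : Int × List Int) j =>
        if PySem.List.pyGetD s.2 j 0 = 8 then
          (j, if 0 ≤ s.1 then pvFillRow s.2 (s.1 + 1) j else s.2)
        else s) (-1, xs)).2) (RowFill1 xs n) ∧
    LastR xs n (((PySem.List.pyRange 0 (n : Int) 1).foldl (fun (s : Int × List Int) j =>
        if PySem.List.pyGetD s.2 j 0 = 8 then
          (j, if 0 ≤ s.1 then pvFillRow s.2 (s.1 + 1) j else s.2)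
        else s) (-1, xs)).1) := by
  intro n
  induction n with
  | zero =>
    intro _
    rw [PySem.List.pyRange_one_eq_nil (by omega)]
    constructor
    · refine AgR_iff xs xs (fun _ => False) _ ⟨rfl, fun b => ⟨fun h => False.elim h, fun _ => rfl⟩⟩ (fun b => ?_)
      unfold RowFill1
      constructor
      · rintro ⟨⟩
      · rintro ⟨_, _, j2, _, h, _⟩; omega
    · exact Or.inl ⟨rfl, fun j hj => by omega⟩
  | succ n ih =>
    intro hn1
    obtain ⟨hAg, hLast⟩ := ih (by omega)
    have hsplit : PySem.List.pyRange 0 ((n : Int) + 1) 1 =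
        PySem.List.pyRange 0 (n : Int) 1 ++ [(n : Int)] :=
      PySem.List.pyRange_one_succ_right (by omega)
    push_cast
    rw [hsplit, List.foldl_append]
    set st := ((PySem.List.pyRange 0 (n : Int) 1).foldl (fun (s : Int × List Int) j =>
        if PySem.List.pyGetD s.2 j 0 = 8 then
          (j, if 0 ≤ s.1 then pvFillRow s.2 (s.1 + 1) j else s.2)
        else s) (-1, xs)) with hst
    have hval : st.2.getD n 0 = xs.getD n 0 := by
      refine (hAg.2 n).2 ?_
      rintro ⟨_, _, j2, h1, h2, _⟩; omega
    simp only [List.foldl_cons, List.foldl_nil]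
    rw [PySem.List.pyGetD_natCast, hval]
    by_cases hP : xs.getD n 0 = 8
    · rw [if_pos hP]
      rcases hLast with ⟨hl, hnone⟩ | ⟨jl, hl, hjln, hPjl, hbet⟩
      · rw [hl]
        norm_num
        constructor
        · refine AgR_iff xs _ _ _ hAg (fun b => ?_)
          have hF1 : ¬ RowFill1 xs n b := by
            rintro ⟨_, ⟨j1, h1, hPj1⟩, ⟨j2, h2, h3, _⟩⟩
            exact hnone j1 (by omega) hPj1
          have hF2 : ¬ RowFill1 xs (n + 1) b := by
            rintro ⟨_, ⟨j1, h1, hPj1⟩, ⟨j2, h2, h3, _⟩⟩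
            exact hnone j1 (by omega) hPj1
          exact ⟨fun h => absurd h hF1, fun h => absurd h hF2⟩
        · exact Or.inr ⟨n, rfl, by omega, hP, fun j h1 h2 => by omega⟩
      · rw [hl]
        rw [if_pos (by positivity)]
        constructor
        · unfold pvFillRow
          have hfill := AgR_fill xs (PySem.List.pyRange ((jl : Int) + 1) (n : Int) 1)
            (fun k hk => by
              rw [PySem.List.mem_pyRange_one] at hk
              constructor <;> omega) st.2 (RowFill1 xs n) hAg
          refine AgR_iff xs _ _ _ hfill (fun b => ?_)
          rw [PySem.List.mem_pyRange_one]
          constructor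
          · rintro (hold | hb)
            · obtain ⟨hne, ⟨j1, h1, hPj1⟩, ⟨j2, h2, h3, hPj2⟩⟩ := hold
              exact ⟨hne, ⟨j1, h1, hPj1⟩, ⟨j2, h2, by omega, hPj2⟩⟩
            · have hjb : jl < b ∧ b < n := by constructor <;> omega
              exact ⟨hbet b hjb.1 hjb.2, ⟨jl, hjb.1, hPjl⟩, ⟨n, hjb.2, by omega, hP⟩⟩
          · rintro ⟨hne, ⟨j1, h1, hPj1⟩, ⟨j2, h2, h3, hPj2⟩⟩
            by_cases hex : ∃ j2', b < j2' ∧ j2' < n ∧ xs.getD j2' 0 = 8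
            · obtain ⟨j2', ha, hb', hc⟩ := hex
              exact Or.inl ⟨hne, ⟨j1, h1, hPj1⟩, ⟨j2', ha, hb', hc⟩⟩
            · have hj2n : j2 = n := by
                by_contra hne2
                exact hex ⟨j2, h2, by omega, hPj2⟩
              subst hj2n
              have hblt : jl < b := by
                rcases Nat.lt_trichotomy b jl with hlt | rfl | hgt
                · exact absurd ⟨jl, hlt, hjln, hPjl⟩ hex
                · exact absurd hPjl hne
                · exact hgt
              right; omega
        · exact Or.inr ⟨n, rfl, by omega, hP, fun j h1 h2 => by omega⟩
    · rw [if_neg hP]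
      constructor
      · refine AgR_iff xs _ _ _ hAg (fun b => ?_)
        constructor
        · rintro ⟨hne, h1, ⟨j2, ha, hb, hc⟩⟩
          exact ⟨hne, h1, ⟨j2, ha, by omega, hc⟩⟩
        · rintro ⟨hne, h1, ⟨j2, ha, hb, hc⟩⟩
          have : j2 ≠ n := by rintro rfl; exact hP hc
          exact ⟨hne, h1, ⟨j2, ha, by omega, hc⟩⟩
      · rcases hLast with ⟨hl, hnone⟩ | ⟨jl, hl, hjln, hPjl, hbet⟩
        · refine Or.inl ⟨hl, fun j hj => ?_⟩
          rcases Nat.lt_or_ge j n with h | h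
          · exact hnone j h
          · have : j = n := by omega
            rw [this]; exact hP
        · refine Or.inr ⟨jl, hl, by omega, hPjl, fun j h1 h2 => ?_⟩
          rcases Nat.lt_or_ge j n with h | h
          · exact hbet j h1 h
          · have : j = n := by omega
            rw [this]; exact hP

lemma rowScan_spec (xs : List Int) (W : Nat) (hW : W ≤ xs.length) :
    AgR xs (pvRowScan (W : Int) xs) (RowFill1 xs W) := (rowScan_aux xs W hW).1

lemma rowF_iff (g : List (List Int)) (a b : Nat) (ha : a < g.length) :
    RowF g a b ↔ RowFill1 (g.getD a []) g.headI.length b := by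
  unfold RowF RowFill1 Eight getc
  constructor
  · rintro ⟨hne, ⟨j1, h1, _, _, v1⟩, ⟨j2, h2, _, h2W, v2⟩⟩
    exact ⟨hne, ⟨j1, h1, v1⟩, ⟨j2, h2, h2W, v2⟩⟩
  · rintro ⟨hne, ⟨j1, h1, v1⟩, ⟨j2, h2, h2W, v2⟩⟩
    exact ⟨hne, ⟨j1, h1, ha, by omega, v1⟩, ⟨j2, h2, ha, h2W, v2⟩⟩

lemma ag_rowpass (g : List (List Int)) (hpre : Pre_p g) :
    Ag g ((g.map (fun row => row)).map (pvRowScan (g.headI.length : Int))) (RowF g) := by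
  have hmapid : g.map (fun row => row) = g := List.map_id' g
  rw [hmapid]
  have hrow : ∀ a : Nat, a < g.length →
      (g.map (pvRowScan (g.headI.length : Int))).getD a [] =
        pvRowScan (g.headI.length : Int) (g.getD a []) := by
    intro a ha
    rw [List.getD_eq_getElem _ [] (by simpa using ha), List.getElem_map,
      List.getD_eq_getElem _ [] ha]
  have hspec : ∀ a : Nat, a < g.length →
      AgR (g.getD a []) (pvRowScan (g.headI.length : Int) (g.getD a []))
        (RowFill1 (g.getD a []) g.headI.length) :=
    fun a ha => rowScan_spec (g.getD a []) g.headI.length (rowlen_ge g hpre a ha)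
  constructor
  · constructor
    · simp
    · intro a
      by_cases ha : a < g.length
      · rw [hrow a ha]; exact (hspec a ha).1
      · rw [List.getD_eq_default _ _ (by simpa using Nat.le_of_not_lt ha),
          List.getD_eq_default _ _ (Nat.le_of_not_lt ha)]
  · intro a b
    by_cases ha : a < g.length
    · have := (hspec a ha).2 b
      unfold getc
      rw [hrow a ha]
      rw [rowF_iff g a b ha]
      exact this
    · have hF : ¬ RowF g a b := by
        rintro ⟨_, ⟨j1, _, hE⟩, _⟩
        exact ha hE.1
      refine ⟨fun h => absurd h hF, fun _ => ?_⟩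
      have e1 : (g.map (pvRowScan (g.headI.length : Int))).getD a [] = [] :=
        List.getD_eq_default _ _ (by simpa using Nat.le_of_not_lt ha)
      have e2 : g.getD a [] = [] := List.getD_eq_default _ _ (Nat.le_of_not_lt ha)
      unfold getc
      rw [e1, e2]

-- ===== column scan for B =====

def ColPre (g : List (List Int)) (jN n x : Nat) : Prop :=
  getc g x jN ≠ 8 ∧ (∃ i1, i1 < x ∧ getc g i1 jN = 8) ∧
  (∃ i2, x < i2 ∧ i2 < n ∧ getc g i2 jN = 8)

def LastC (g : List (List Int)) (jN n : Nat) (l : Int) : Prop :=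
  (l = -1 ∧ ∀ i, i < n → getc g i jN ≠ 8) ∨
  (∃ il : Nat, l = (il : Int) ∧ il < n ∧ getc g il jN = 8 ∧
    ∀ i, il < i → i < n → getc g i jN ≠ 8)

lemma colScan_aux (g : List (List Int)) (hpre : Pre_p g) (jN : Nat)
    (hjW : jN < g.headI.length) (G : List (List Int)) (S : Nat → Nat → Prop)
    (hS : ∀ a b, S a b → getc g a b ≠ 8) (h : Ag g G S) :
    ∀ n : Nat, n ≤ g.length →
    Ag g (((PySem.List.pyRange 0 (n : Int) 1).foldl (fun (s : Int × List (List Int)) i =>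
        if pvCell s.2 i (jN : Int) = 8 then
          (i, if 0 ≤ s.1 then
                (PySem.List.pyRange (s.1 + 1) i 1).foldl (fun G k => pvSet G k (jN : Int) 3) s.2
              else s.2)
        else s) (-1, G)).2) (fun x y => S x y ∨ (y = jN ∧ ColPre g jN n x)) ∧
    LastC g jN n (((PySem.List.pyRange 0 (n : Int) 1).foldl (fun (s : Int × List (List Int)) i =>
        if pvCell s.2 i (jN : Int) = 8 then
          (i, if 0 ≤ s.1 then
                (PySem.List.pyRange (s.1 + 1) i 1).foldl (fun G k => pvSet G k (jN : Int) 3) s.2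
              else s.2)
        else s) (-1, G)).1) := by
  intro n
  induction n with
  | zero =>
    intro _
    rw [PySem.List.pyRange_one_eq_nil (by omega)]
    constructor
    · refine Ag_iff g G S _ h (fun x y => ?_)
      constructor
      · exact fun hs => Or.inl hs
      · rintro (hs | ⟨_, _, _, i2, _, hi, _⟩)
        · exact hs
        · omega
    · exact Or.inl ⟨rfl, fun i hi => by omega⟩
  | succ n ih =>
    intro hn1
    obtain ⟨hAg, hLast⟩ := ih (by omega)
    have hSacc : ∀ a b, (S a b ∨ (b = jN ∧ ColPre g jN n a)) → getc g a b ≠ 8 := by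
      rintro a b (hs | ⟨rfl, hcp⟩)
      · exact hS a b hs
      · exact hcp.1
    have hsplit : PySem.List.pyRange 0 ((n : Int) + 1) 1 =
        PySem.List.pyRange 0 (n : Int) 1 ++ [(n : Int)] :=
      PySem.List.pyRange_one_succ_right (by omega)
    push_cast
    rw [hsplit, List.foldl_append]
    set st := ((PySem.List.pyRange 0 (n : Int) 1).foldl (fun (s : Int × List (List Int)) i =>
        if pvCell s.2 i (jN : Int) = 8 then
          (i, if 0 ≤ s.1 then
                (PySem.List.pyRange (s.1 + 1) i 1).foldl (fun G k => pvSet G k (jN : Int) 3) s.2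
              else s.2)
        else s) (-1, G)) with hst
    have hval : getc st.2 n jN = 8 ↔ getc g n jN = 8 := by
      by_cases hm : S n jN ∨ (jN = jN ∧ ColPre g jN n n)
      · have h3 : getc st.2 n jN = 3 := (hAg.2 n jN).1 hm
        have h8 : getc g n jN ≠ 8 := hSacc n jN hm
        rw [h3]
        constructor
        · intro hc; omega
        · intro hc; exact absurd hc h8
      · rw [(hAg.2 n jN).2 hm]
    simp only [List.foldl_cons, List.foldl_nil]
    rw [pvCell_natCast]
    by_cases hP : getc g n jN = 8
    · rw [if_pos (hval.2 hP)]
      rcases hLast with ⟨hl, hnone⟩ | ⟨il, hl, hiln, hPil, hbet⟩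
      · rw [hl]
        norm_num
        constructor
        · refine Ag_iff g _ _ _ hAg (fun x y => ?_)
          have hF : ∀ m, m ≤ n + 1 → ¬ ColPre g jN m x := by
            intro m hm
            rintro ⟨_, ⟨i1, h1, hPi1⟩, ⟨i2, h2, h3, _⟩⟩
            exact hnone i1 (by omega) hPi1
          constructor
          · rintro (hs | ⟨rfl, hcp⟩)
            · exact Or.inl hs
            · exact absurd hcp (hF n (by omega))
          · rintro (hs | ⟨rfl, hcp⟩)
            · exact Or.inl hs
            · exact absurd hcp (hF (n + 1) (by omega))
        · exact Or.inr ⟨n, rfl, by omega, hP, fun i h1 h2 => by omega⟩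
      · rw [hl]
        rw [if_pos (by positivity)]
        constructor
        · have hfill := Ag_fill_map g hpre (fun k => (k, (jN : Int)))
            (PySem.List.pyRange ((il : Int) + 1) (n : Int) 1)
            (fun k hk => by
              rw [PySem.List.mem_pyRange_one] at hk
              have hn : n < g.length := by omega
              show 0 ≤ k ∧ k < (g.length : Int) ∧ 0 ≤ (jN : Int) ∧ (jN : Int) < (g.headI.length : Int)
              refine ⟨by omega, by omega, by omega, by omega⟩)
            st.2 _ hAg
          refine Ag_iff g _ _ _ hfill (fun x y => ?_)
          constructor
          · rintro ((hs | ⟨rfl, hne, hl8, ⟨i2, h2a, h2b, h2c⟩⟩) | ⟨k, hk, hx, hy⟩)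
            · exact Or.inl hs
            · exact Or.inr ⟨rfl, hne, hl8, ⟨i2, h2a, by omega, h2c⟩⟩
            · rw [PySem.List.mem_pyRange_one] at hk
              have hx2 : (x : Int) = k := hx
              have hy2 : (y : Int) = (jN : Int) := hy
              have hy' : y = jN := by exact_mod_cast hy2
              have hxi : il < x ∧ x < n := by constructor <;> omega
              exact Or.inr ⟨hy', hbet x hxi.1 hxi.2, ⟨il, hxi.1, hPil⟩,
                ⟨n, hxi.2, by omega, hP⟩⟩
          · rintro (hs | ⟨rfl, hne, ⟨i1, h1, hPi1⟩, ⟨i2, h2, h3, hPi2⟩⟩)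
            · exact Or.inl (Or.inl hs)
            · by_cases hex : ∃ i2', x < i2' ∧ i2' < n ∧ getc g i2' y = 8
              · obtain ⟨i2', ha2, hb2, hc2⟩ := hex
                exact Or.inl (Or.inr ⟨rfl, hne, ⟨i1, h1, hPi1⟩, ⟨i2', ha2, hb2, hc2⟩⟩)
              · have hi2n : i2 = n := by
                  by_contra hne2
                  exact hex ⟨i2, h2, by omega, hPi2⟩
                subst hi2n
                have hxil : il < x := by
                  rcases Nat.lt_trichotomy x il with hlt | heq | hgt
                  · exact absurd ⟨il, hlt, hiln, hPil⟩ hex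
                  · exact absurd hPil (heq ▸ hne)
                  · exact hgt
                refine Or.inr ⟨(x : Int), ?_, rfl, rfl⟩
                rw [PySem.List.mem_pyRange_one]
                constructor <;> omega
        · exact Or.inr ⟨n, rfl, by omega, hP, fun i h1 h2 => by omega⟩
    · rw [if_neg (fun hc => hP (hval.1 hc))]
      constructor
      · refine Ag_iff g _ _ _ hAg (fun x y => ?_)
        constructor
        · rintro (hs | ⟨rfl, hne, h1, ⟨i2, ha, hb, hc⟩⟩)
          · exact Or.inl hs
          · exact Or.inr ⟨rfl, hne, h1, ⟨i2, ha, by omega, hc⟩⟩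
        · rintro (hs | ⟨rfl, hne, h1, ⟨i2, ha, hb, hc⟩⟩)
          · exact Or.inl hs
          · have : i2 ≠ n := by rintro rfl; exact hP hc
            exact Or.inr ⟨rfl, hne, h1, ⟨i2, ha, by omega, hc⟩⟩
      · rcases hLast with ⟨hl, hnone⟩ | ⟨il, hl, hiln, hPil, hbet⟩
        · refine Or.inl ⟨hl, fun i hi => ?_⟩
          rcases Nat.lt_or_ge i n with hlt | hge
          · exact hnone i hlt
          · have : i = n := by omega
            rw [this]; exact hP
        · refine Or.inr ⟨il, hl, by omega, hPil, fun i h1 h2 => ?_⟩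
          rcases Nat.lt_or_ge i n with hlt | hge
          · exact hbet i h1 hlt
          · have : i = n := by omega
            rw [this]; exact hP


-- ===== walk machinery for A =====

def Inb (g : List (List Int)) (C D E F : Int) (t : Nat) : Prop :=
  0 ≤ C + (t : Int) * E ∧ C + (t : Int) * E < (g.length : Int) ∧
  0 ≤ D + (t : Int) * F ∧ D + (t : Int) * F < (g.headI.length : Int)

def HitSpec (g : List (List Int)) (C D E F : Int) (m : Nat) : Prop :=
  1 ≤ m ∧ Inb g C D E F m ∧ pvCell g (C + (m : Int) * E) (D + (m : Int) * F) = 8 ∧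
  ∀ s : Nat, 1 ≤ s → s < m →
    Inb g C D E F s ∧ pvCell g (C + (s : Int) * E) (D + (s : Int) * F) ≠ 8

def WrW (g : List (List Int)) (C D E F : Int) (x y : Nat) : Prop :=
  ∃ m t : Nat, HitSpec g C D E F m ∧ 1 ≤ t ∧ t < m ∧
    (x : Int) = C + (t : Int) * E ∧ (y : Int) = D + (t : Int) * F

lemma hit_unique (g : List (List Int)) (C D E F : Int) (m m' : Nat)
    (h : HitSpec g C D E F m) (h' : HitSpec g C D E F m') : m = m' := by
  rcases Nat.lt_trichotomy m m' with hlt | heq | hgt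
  · exact absurd h.2.2.1 ((h'.2.2.2 m h.1 hlt).2)
  · exact heq
  · exact absurd h'.2.2.1 ((h.2.2.2 m' h'.1 hgt).2)

lemma hit_none (g : List (List Int)) (C D E F : Int) (a : Nat)
    (hmono : ∀ s t : Nat, s ≤ t → Inb g C D E F t → Inb g C D E F s)
    (hprefix : ∀ s : Nat, 1 ≤ s → s < a →
      Inb g C D E F s ∧ pvCell g (C + (s : Int) * E) (D + (s : Int) * F) ≠ 8)
    (hnb : ¬ Inb g C D E F a) : ∀ m, ¬ HitSpec g C D E F m := by
  intro m hm
  rcases Nat.lt_or_ge m a with hlt | hge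
  · exact (hprefix m hm.1 hlt).2 hm.2.2.1
  · exact hnb (hmono a m hge hm.2.1)

lemma wrW_pos (g : List (List Int)) (C D E F : Int) (x y : Nat)
    (h : WrW g C D E F x y) : getc g x y ≠ 8 := by
  obtain ⟨m, t, hs, ht1, htm, hx, hy⟩ := h
  have hInb := (hs.2.2.2 t ht1 htm).1
  have hc := (hs.2.2.2 t ht1 htm).2
  intro hg
  apply hc
  rw [pvCell_nonneg g _ _ hInb.1 hInb.2.2.1]
  have hx' : (C + (t : Int) * E).toNat = x := by omega
  have hy' : (D + (t : Int) * F).toNat = y := by omega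
  rw [hx', hy']
  exact hg

lemma walk_spec (g : List (List Int)) (hpre : Pre_p g) (C D E F : Int)
    (hmono : ∀ s t : Nat, s ≤ t → Inb g C D E F t → Inb g C D E F s) :
    ∀ (fuel : Nat) (a : Nat), 1 ≤ a →
    (∀ s : Nat, 1 ≤ s → s < a →
      Inb g C D E F s ∧ pvCell g (C + (s : Int) * E) (D + (s : Int) * F) ≠ 8) →
    (∃ T : Nat, ¬ Inb g C D E F T ∧ T < a + fuel) →
    ∀ (G : List (List Int)) (S : Nat → Nat → Prop), Ag g G S →
    Ag g (pvWalkA g C D E F (g.length : Int) (g.headI.length : Int) G (a : Int) fuel)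
      (fun x y => S x y ∨ WrW g C D E F x y) := by
  intro fuel
  induction fuel with
  | zero =>
    intro a ha hprefix hfuel G S hAg
    obtain ⟨T, hT, hTa⟩ := hfuel
    have hnb : ¬ Inb g C D E F a := fun h => hT (hmono T a (by omega) h)
    have hnone := hit_none g C D E F a hmono hprefix hnb
    refine Ag_iff g _ _ _ hAg (fun x y => ?_)
    constructor
    · exact fun hs => Or.inl hs
    · rintro (hs | ⟨m, t, hm, _⟩)
      · exact hs
      · exact absurd hm (hnone m)
  | succ fuel ih =>
    intro a ha hprefix hfuel G S hAg
    simp only [pvWalkA]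
    split_ifs with hcond hc8
    · -- in bounds, hit an 8 at step a
      have hInbA : Inb g C D E F a := hcond
      have hhit : HitSpec g C D E F a := ⟨ha, hInbA, hc8, hprefix⟩
      have hfill := Ag_fill_map g hpre (fun J => (C + J * E, D + J * F))
        (PySem.List.pyRange 1 (a : Int) 1)
        (fun J hJ => by
          rw [PySem.List.mem_pyRange_one] at hJ
          obtain ⟨JN, rfl⟩ : ∃ n : Nat, J = (n : Int) := ⟨J.toNat, by omega⟩
          have hJN : 1 ≤ JN ∧ JN < a := by constructor <;> omega
          have := (hprefix JN hJN.1 hJN.2).1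
          exact ⟨this.1, this.2.1, this.2.2.1, this.2.2.2⟩)
        G S hAg
      refine Ag_iff g _ _ _ hfill (fun x y => ?_)
      constructor
      · rintro (hs | ⟨J, hJ, hx, hy⟩)
        · exact Or.inl hs
        · rw [PySem.List.mem_pyRange_one] at hJ
          obtain ⟨JN, rfl⟩ : ∃ n : Nat, J = (n : Int) := ⟨J.toNat, by omega⟩
          exact Or.inr ⟨a, JN, hhit, by omega, by omega, hx, hy⟩
      · rintro (hs | ⟨m, t, hm, ht1, htm, hx, hy⟩)
        · exact Or.inl hs
        · have hma : m = a := hit_unique g C D E F m a hm hhit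
          subst hma
          refine Or.inr ⟨(t : Int), ?_, hx, hy⟩
          rw [PySem.List.mem_pyRange_one]
          constructor <;> omega
    · -- in bounds, no 8: advance
      have hrec := ih (a + 1) (by omega)
        (fun s hs1 hsa => by
          rcases Nat.lt_or_ge s a with hlt | hge
          · exact hprefix s hs1 hlt
          · have : s = a := by omega
            subst this
            exact ⟨hcond, hc8⟩)
        (by obtain ⟨T, hT, hTa⟩ := hfuel; exact ⟨T, hT, by omega⟩)
        G S hAg
      have hcast : ((a : Int) + 1) = (((a + 1 : Nat)) : Int) := by push_cast; ring
      rw [hcast]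
      exact hrec
    · -- out of bounds: stop
      have hnone := hit_none g C D E F a hmono hprefix hcond
      refine Ag_iff g _ _ _ hAg (fun x y => ?_)
      constructor
      · exact fun hs => Or.inl hs
      · rintro (hs | ⟨m, t, hm, _⟩)
        · exact hs
        · exact absurd hm (hnone m)


def AW (g : List (List Int)) (x y : Nat) : Prop :=
  ∃ CN DN : Nat, Eight g CN DN ∧
    ∃ EF ∈ ([((0 : Int), (1 : Int)), (1, 0), (0, -1), (-1, 0)] : List (Int × Int)),
      WrW g (CN : Int) (DN : Int) EF.1 EF.2 x y

lemma consec (P : Nat → Prop) [DecidablePred P] (b W : Nat) (hb : ¬ P b)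
    (hl : ∃ j1, j1 < b ∧ P j1) (hr : ∃ j2, b < j2 ∧ j2 < W ∧ P j2) :
    ∃ j1 j2, j1 < b ∧ b < j2 ∧ j2 < W ∧ P j1 ∧ P j2 ∧
      ∀ k, j1 < k → k < j2 → ¬ P k := by
  obtain ⟨j1', hj1b, hPj1⟩ := hl
  have hPj1g : P (Nat.findGreatest P (b - 1)) :=
    Nat.findGreatest_spec (m := j1') (by omega) hPj1
  have hj1le : Nat.findGreatest P (b - 1) ≤ b - 1 := Nat.findGreatest_le _
  have hex : ∃ j2, b < j2 ∧ j2 < W ∧ P j2 := hr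
  have hspec := Nat.find_spec hex
  refine ⟨Nat.findGreatest P (b - 1), Nat.find hex, by omega, hspec.1, hspec.2.1,
    hPj1g, hspec.2.2, ?_⟩
  intro k h1 h2
  rcases Nat.lt_trichotomy k b with hlt | rfl | hgt
  · exact Nat.findGreatest_is_greatest h1 (by omega)
  · exact hb
  · intro hP
    exact Nat.find_min hex h2 ⟨hgt, by omega, hP⟩

lemma aw_to_fill (g : List (List Int)) (x y : Nat) (h : AW g x y) : Fill g x y := by
  obtain ⟨CN, DN, hE, ⟨E, F⟩, hEF, hW⟩ := h
  have hne : getc g x y ≠ 8 := wrW_pos g _ _ _ _ x y hW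
  obtain ⟨m, t, hs, ht1, htm, hx, hy⟩ := hW
  have hInbm := hs.2.1
  have hc8m := hs.2.2.1
  unfold Inb at hInbm
  simp only [List.mem_cons, Prod.mk.injEq] at hEF
  rcases hEF with ⟨rfl, rfl⟩ | ⟨rfl, rfl⟩ | ⟨rfl, rfl⟩ | (⟨rfl, rfl⟩ | h0)
  · -- (0, 1): rightward in row CN
    have hx' : x = CN := by omega
    have hy' : y = DN + t := by omega
    have e1 : ((CN : Int) + (m : Int) * 0) = ((CN : Nat) : Int) := by ring
    have e2 : ((DN : Int) + (m : Int) * 1) = (((DN + m : Nat)) : Int) := by push_cast; ring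
    rw [e1, e2, pvCell_natCast] at hc8m
    subst hx' hy'
    exact Or.inl ⟨hne, ⟨DN, by omega, hE⟩,
      ⟨DN + m, by omega, hE.1, by omega, hc8m⟩⟩
  · -- (1, 0): downward in column DN
    have hx' : x = CN + t := by omega
    have hy' : y = DN := by omega
    have e1 : ((CN : Int) + (m : Int) * 1) = (((CN + m : Nat)) : Int) := by push_cast; ring
    have e2 : ((DN : Int) + (m : Int) * 0) = ((DN : Nat) : Int) := by ring
    rw [e1, e2, pvCell_natCast] at hc8m
    subst hx' hy'
    exact Or.inr ⟨hne, ⟨CN, by omega, hE⟩,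
      ⟨CN + m, by omega, by omega, hE.2.1, hc8m⟩⟩
  · -- (0, -1): leftward in row CN
    have hx' : x = CN := by omega
    have hy' : y = DN - t := by omega
    have hyt : t ≤ DN := by omega
    have e1 : ((CN : Int) + (m : Int) * 0) = ((CN : Nat) : Int) := by ring
    have e2 : ((DN : Int) + (m : Int) * (-1)) = (((DN - m : Nat)) : Int) := by omega
    rw [e1, e2, pvCell_natCast] at hc8m
    subst hx' hy'
    exact Or.inl ⟨hne, ⟨DN - m, by omega, hE.1, by omega, hc8m⟩,
      ⟨DN, by omega, hE⟩⟩
  · -- (-1, 0): upward in column DN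
    have hx' : x = CN - t := by omega
    have hy' : y = DN := by omega
    have e1 : ((CN : Int) + (m : Int) * (-1)) = (((CN - m : Nat)) : Int) := by omega
    have e2 : ((DN : Int) + (m : Int) * 0) = ((DN : Nat) : Int) := by ring
    rw [e1, e2, pvCell_natCast] at hc8m
    subst hx' hy'
    exact Or.inr ⟨hne, ⟨CN - m, by omega, by omega, hE.2.1, hc8m⟩,
      ⟨CN, by omega, hE⟩⟩
  · exact absurd h0 (by simp)

lemma fill_to_aw (g : List (List Int)) (x y : Nat) (h : Fill g x y) : AW g x y := by
  rcases h with ⟨hne, ⟨j1', hj1, hE1⟩, ⟨j2', hj2, hE2⟩⟩ | ⟨hne, ⟨i1', hi1, hE1⟩, ⟨i2', hi2, hE2⟩⟩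
  · -- row fill: direction (0, 1) from the nearest 8 on the left
    obtain ⟨j1, j2, hj1b, hbj2, hj2W, hP1, hP2, hbet⟩ :=
      consec (fun j => getc g x j = 8) y g.headI.length hne
        ⟨j1', hj1, hE1.2.2⟩ ⟨j2', hj2, hE2.2.1, hE2.2.2⟩
    have hxH : x < g.length := hE1.1
    refine ⟨x, j1, ⟨hE1.1, by omega, hP1⟩, (0, 1), by simp, j2 - j1, y - j1,
      ⟨by omega, ⟨by omega, by omega, by omega, by omega⟩, ?_, ?_⟩, by omega, by omega,
      by omega, by omega⟩
    · have e1 : ((x : Int) + ((j2 - j1 : Nat) : Int) * 0) = ((x : Nat) : Int) := by ring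
      have e2 : ((j1 : Int) + ((j2 - j1 : Nat) : Int) * 1) = ((j2 : Nat) : Int) := by omega
      rw [e1, e2, pvCell_natCast]
      exact hP2
    · intro s hs1 hsm
      refine ⟨⟨by omega, by omega, by omega, by omega⟩, ?_⟩
      have e1 : ((x : Int) + (s : Int) * 0) = ((x : Nat) : Int) := by ring
      have e2 : ((j1 : Int) + (s : Int) * 1) = (((j1 + s : Nat)) : Int) := by omega
      rw [e1, e2, pvCell_natCast]
      exact hbet (j1 + s) (by omega) (by omega)
  · -- column fill: direction (1, 0) from the nearest 8 above
    obtain ⟨i1, i2, hi1b, hbi2, hi2H, hP1, hP2, hbet⟩ :=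
      consec (fun i => getc g i y = 8) x g.length hne
        ⟨i1', hi1, hE1.2.2⟩ ⟨i2', hi2, hE2.1, hE2.2.2⟩
    have hyW : y < g.headI.length := hE1.2.1
    refine ⟨i1, y, ⟨by omega, hE1.2.1, hP1⟩, (1, 0), by simp, i2 - i1, x - i1,
      ⟨by omega, ⟨by omega, by omega, by omega, ?_⟩, ?_, ?_⟩, by omega, by omega,
      by omega, by omega⟩
    · have := hE1.2.1; omega
    · have e1 : ((i1 : Int) + ((i2 - i1 : Nat) : Int) * 1) = ((i2 : Nat) : Int) := by omega
      have e2 : ((y : Int) + ((i2 - i1 : Nat) : Int) * 0) = ((y : Nat) : Int) := by ring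
      rw [e1, e2, pvCell_natCast]
      exact hP2
    · intro s hs1 hsm
      refine ⟨⟨by omega, by omega, by omega, by push_cast; omega⟩, ?_⟩
      have e1 : ((i1 : Int) + (s : Int) * 1) = (((i1 + s : Nat)) : Int) := by omega
      have e2 : ((y : Int) + (s : Int) * 0) = ((y : Nat) : Int) := by ring
      rw [e1, e2, pvCell_natCast]
      exact hbet (i1 + s) (by omega) (by omega)

lemma mem_K_iff (g : List (List Int)) (CD : Int × Int) :
    CD ∈ (PySem.List.pyRange 0 (g.length : Int) 1).flatMap (fun A =>
      ((PySem.List.pyRange 0 (g.headI.length : Int) 1).filter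
        (fun C => pvCell g A C == 8)).map (fun C => (A, C))) ↔
    ∃ CN DN : Nat, CD = ((CN : Int), (DN : Int)) ∧ Eight g CN DN := by
  simp only [List.mem_flatMap, List.mem_map, List.mem_filter,
    PySem.List.mem_pyRange_one, beq_iff_eq]
  constructor
  · rintro ⟨A, ⟨hA0, hAH⟩, C, ⟨⟨hC0, hCW⟩, hc8⟩, rfl⟩
    refine ⟨A.toNat, C.toNat,
      by simp [Int.toNat_of_nonneg hA0, Int.toNat_of_nonneg hC0],
      by omega, by omega, ?_⟩
    rw [← pvCell_nonneg g A C hA0 hC0]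
    exact hc8
  · rintro ⟨CN, DN, rfl, hE⟩
    have h1 := hE.1
    have h2 := hE.2.1
    refine ⟨(CN : Int), ⟨by omega, by omega⟩, (DN : Int),
      ⟨⟨by omega, by omega⟩, ?_⟩, rfl⟩
    rw [pvCell_natCast]
    exact hE.2.2

theorem ag_main_a (g : List (List Int)) (hpre : Pre_p g) : Ag g (p g) (Fill g) := by
  have hW : PySem.List.pyGetD g 0 [] = g.headI := by
    rw [PySem.List.pyGetD_zero, getD_zero_headI]
  have hrep : p g = ((PySem.List.pyRange 0 (g.length : Int) 1).flatMap (fun A =>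
      ((PySem.List.pyRange 0 (g.headI.length : Int) 1).filter
        (fun C => pvCell g A C == 8)).map (fun C => (A, C)))).foldl (fun G2 CD =>
      ([((0 : Int), (1 : Int)), (1, 0), (0, -1), (-1, 0)]).foldl (fun G3 EF =>
        pvWalkA g CD.1 CD.2 EF.1 EF.2 (g.length : Int) (g.headI.length : Int) G3 1
          (g.length + g.headI.length + 1)) G2) g := by
    unfold p
    rw [hW, List.map_id']
    norm_num
  rw [hrep]
  have hdirstep : ∀ (G : List (List Int)) (S : Nat → Nat → Prop) (CD : Int × Int),
      CD ∈ (PySem.List.pyRange 0 (g.length : Int) 1).flatMap (fun A =>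
        ((PySem.List.pyRange 0 (g.headI.length : Int) 1).filter
          (fun C => pvCell g A C == 8)).map (fun C => (A, C))) →
      (∀ a b, S a b → getc g a b ≠ 8) → Ag g G S →
      Ag g (([((0 : Int), (1 : Int)), (1, 0), (0, -1), (-1, 0)]).foldl (fun G3 EF =>
          pvWalkA g CD.1 CD.2 EF.1 EF.2 (g.length : Int) (g.headI.length : Int) G3 1
            (g.length + g.headI.length + 1)) G)
        (fun a b => S a b ∨ ∃ EF ∈ ([((0 : Int), (1 : Int)), (1, 0), (0, -1), (-1, 0)] :
            List (Int × Int)), WrW g CD.1 CD.2 EF.1 EF.2 a b) := by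
    intro G S CD hCD hS hAg
    rw [mem_K_iff] at hCD
    obtain ⟨CN, DN, rfl, hE⟩ := hCD
    have hE1 := hE.1
    have hE2 := hE.2.1
    refine Ag_foldl_union g
      ([((0 : Int), (1 : Int)), (1, 0), (0, -1), (-1, 0)] : List (Int × Int))
      (fun EF a b => WrW g (CN : Int) (DN : Int) EF.1 EF.2 a b) _
      (fun EF _ a b hww => wrW_pos g _ _ _ _ a b hww) ?_ G S hS hAg
    intro G2 S2 EF hEF hS2 hAg2
    have hEF' : EF = ((0 : Int), (1 : Int)) ∨ EF = (1, 0) ∨ EF = (0, -1) ∨ EF = (-1, 0) := by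
      simpa using hEF
    have hmain : ∀ E F : Int, EF = (E, F) →
        (∀ s t : Nat, s ≤ t → Inb g (CN : Int) (DN : Int) E F t → Inb g (CN : Int) (DN : Int) E F s) →
        ¬ Inb g (CN : Int) (DN : Int) E F (g.length + g.headI.length) →
        Ag g (pvWalkA g (CN : Int) (DN : Int) E F (g.length : Int) (g.headI.length : Int) G2 1
            (g.length + g.headI.length + 1))
          (fun a b => S2 a b ∨ WrW g (CN : Int) (DN : Int) E F a b) := by
      intro E F hEFe hmono hesc
      have hw := walk_spec g hpre (CN : Int) (DN : Int) E F hmono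
        (g.length + g.headI.length + 1) 1 le_rfl (fun s h1 h2 => by omega)
        ⟨g.length + g.headI.length, hesc, by omega⟩ G2 S2 hAg2
      simpa using hw
    rcases hEF' with rfl | rfl | rfl | rfl
    · exact hmain 0 1 rfl
        (by
          intro s t hst h
          unfold Inb at *
          obtain ⟨a1, a2, a3, a4⟩ := h
          exact ⟨by omega, by omega, by omega, by omega⟩)
        (by unfold Inb; rintro ⟨a1, a2, a3, a4⟩; omega)
    · exact hmain 1 0 rfl
        (by
          intro s t hst h
          unfold Inb at *
          obtain ⟨a1, a2, a3, a4⟩ := h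
          exact ⟨by omega, by omega, by omega, by omega⟩)
        (by unfold Inb; rintro ⟨a1, a2, a3, a4⟩; omega)
    · exact hmain 0 (-1) rfl
        (by
          intro s t hst h
          unfold Inb at *
          obtain ⟨a1, a2, a3, a4⟩ := h
          exact ⟨by omega, by omega, by omega, by omega⟩)
        (by unfold Inb; rintro ⟨a1, a2, a3, a4⟩; omega)
    · exact hmain (-1) 0 rfl
        (by
          intro s t hst h
          unfold Inb at *
          obtain ⟨a1, a2, a3, a4⟩ := h
          exact ⟨by omega, by omega, by omega, by omega⟩)
        (by unfold Inb; rintro ⟨a1, a2, a3, a4⟩; omega)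
  have hfold := Ag_foldl_union g _
    (fun (CD : Int × Int) a b => ∃ EF ∈ ([((0 : Int), (1 : Int)), (1, 0), (0, -1), (-1, 0)] :
        List (Int × Int)), WrW g CD.1 CD.2 EF.1 EF.2 a b)
    _
    (fun CD _ a b hww => by obtain ⟨EF, _, hw2⟩ := hww; exact wrW_pos g _ _ _ _ a b hw2)
    hdirstep g (fun _ _ => False) (fun a b h => h.elim) (Ag_refl g)
  refine Ag_iff g _ _ _ hfold (fun x y => ?_)
  constructor
  · rintro (hf | ⟨CD, hCD, EF, hEF, hww⟩)
    · exact hf.elim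
    · rw [mem_K_iff] at hCD
      obtain ⟨CN, DN, rfl, hE⟩ := hCD
      exact aw_to_fill g x y ⟨CN, DN, hE, EF, hEF, hww⟩
  · intro hf
    obtain ⟨CN, DN, hE, EF, hEF, hww⟩ := fill_to_aw g x y hf
    exact Or.inr ⟨((CN : Int), (DN : Int)), (mem_K_iff g _).2 ⟨CN, DN, rfl, hE⟩, EF, hEF, hww⟩

lemma colScan_spec (g : List (List Int)) (hpre : Pre_p g) (jN : Nat)
    (hjW : jN < g.headI.length) (G : List (List Int)) (S : Nat → Nat → Prop)
    (hS : ∀ a b, S a b → getc g a b ≠ 8) (h : Ag g G S) :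
    Ag g (pvColScan (g.length : Int) (jN : Int) G)
      (fun x y => S x y ∨ ((y : Int) = (jN : Int) ∧ ColF g x y)) := by
  have haux := (colScan_aux g hpre jN hjW G S hS h g.length le_rfl).1
  unfold pvColScan
  refine Ag_iff g _ _ _ haux (fun x y => ?_)
  constructor
  · rintro (hs | ⟨rfl, hne, ⟨i1, h1, v1⟩, ⟨i2, h2, h3, v2⟩⟩)
    · exact Or.inl hs
    · exact Or.inr ⟨rfl, hne, ⟨i1, h1, by omega, hjW, v1⟩, ⟨i2, h2, h3, hjW, v2⟩⟩
  · rintro (hs | ⟨hyy, hne, ⟨i1, h1, E1⟩, ⟨i2, h2, E2⟩⟩)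
    · exact Or.inl hs
    · have hyy' : y = jN := by exact_mod_cast hyy
      subst hyy'
      exact Or.inr ⟨rfl, hne, ⟨i1, h1, E1.2.2⟩, ⟨i2, h2, E2.1, E2.2.2⟩⟩

theorem ag_main_b (g : List (List Int)) (hpre : Pre_p g) : Ag g (p_alt g) (Fill g) := by
  have hW : PySem.List.pyGetD g 0 [] = g.headI := by
    rw [PySem.List.pyGetD_zero, getD_zero_headI]
  have hrep : p_alt g = (PySem.List.pyRange 0 ((g.headI.length : Nat) : Int) 1).foldl
      (fun out2 j => pvColScan ((g.length : Nat) : Int) j out2)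
      ((g.map (fun row => row)).map (pvRowScan ((g.headI.length : Nat) : Int))) := by
    unfold p_alt
    rw [hW]
    simp
  rw [hrep]
  have hbase := ag_rowpass g hpre
  have hfold := Ag_foldl_union g (PySem.List.pyRange 0 ((g.headI.length : Nat) : Int) 1)
    (fun (j : Int) x y => (y : Int) = j ∧ ColF g x y)
    (fun out2 j => pvColScan ((g.length : Nat) : Int) j out2)
    (fun j _ a b hww => hww.2.1)
    (fun G S j hj hSne hAg => by
      rw [PySem.List.mem_pyRange_one] at hj
      obtain ⟨jn, rfl⟩ : ∃ n : Nat, j = (n : Int) := ⟨j.toNat, (Int.toNat_of_nonneg hj.1).symm⟩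
      exact colScan_spec g hpre jn (by exact_mod_cast hj.2) G S hSne hAg)
    _ _ (fun a b hr => hr.1) hbase
  refine Ag_iff g _ _ _ hfold (fun x y => ?_)
  constructor
  · rintro (hr | ⟨j, _, _, hc⟩)
    · exact Or.inl hr
    · exact Or.inr hc
  · rintro (hr | hc)
    · exact Or.inl hr
    · refine Or.inr ⟨(y : Int), ?_, rfl, hc⟩
      rw [PySem.List.mem_pyRange_one]
      have : y < g.headI.length := hc.2.1.choose_spec.2.2.1
      constructor <;> omega

theorem eq_of_ag (g X Y : List (List Int)) (S : Nat → Nat → Prop)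
    (hX : Ag g X S) (hY : Ag g Y S) : X = Y := by
  obtain ⟨⟨hXl, hXr⟩, hXc⟩ := hX
  obtain ⟨⟨hYl, hYr⟩, hYc⟩ := hY
  apply List.ext_getElem (by omega)
  intro a ha ha'
  apply List.ext_getElem
  · have h1 := hXr a; have h2 := hYr a
    rw [List.getD_eq_getElem X [] ha] at h1
    rw [List.getD_eq_getElem Y [] ha'] at h2
    omega
  · intro b hb hb'
    have h1 := hXc a b; have h2 := hYc a b
    have eX : getc X a b = X[a][b] := by
      unfold getc
      rw [List.getD_eq_getElem X [] ha, List.getD_eq_getElem _ _ hb]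
    have eY : getc Y a b = Y[a][b] := by
      unfold getc
      rw [List.getD_eq_getElem Y [] ha', List.getD_eq_getElem _ _ hb']
    by_cases hS : S a b
    · rw [← eX, ← eY, h1.1 hS, h2.1 hS]
    · rw [← eX, ← eY, h1.2 hS, h2.2 hS]

-- ===== VERDICT (by name: the statement is the Claim_ definition above) =====
theorem p_spec : Claim_equal_p := by
  intro g _ hpre
  unfold Spec_p
  exact eq_of_ag g (p g) (p_alt g) (Fill g) (ag_main_a g hpre) (ag_main_b g hpre)
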